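-- pv_equiv track=rewrite | github.com/costamay/codility-practice | sanotoriumAccomodation.py | solution
-- ===== SOURCE A (Python) =====
-- def solution(A):
--     # Implement your solution here
--     A.sort()
--     rooms = 1
--     room_capacity = A[0]
--
--     guest_in_room = 1
--
--     for i in range(1 , len(A)):
--         if guest_in_room < room_capacity:
--             guest_in_room += 1
--
--         else:
--             rooms += 1
--             room_capacity = A[i]
--             guest_in_room = 1
--
--     return rooms
-- ===== SOURCE B (Python) =====
-- def solution(A):
--     A.sort()
--     n = len(A)
--     if n == 0:
--         return 0
--     rooms = 0
--     i = 0
--     while i < n: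
--         rooms += 1
--         i += max(1, A[i])
--     return rooms
-- ===== Notes on version B (the rewrite author's own statement) =====
-- stated objective: simpler
-- what changed: Replaces the per-guest counter/branch scan with an index-jump loop that skips a whole room of max(1, capacity) guests per step after the same in-place sort.
import Mathlib
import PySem

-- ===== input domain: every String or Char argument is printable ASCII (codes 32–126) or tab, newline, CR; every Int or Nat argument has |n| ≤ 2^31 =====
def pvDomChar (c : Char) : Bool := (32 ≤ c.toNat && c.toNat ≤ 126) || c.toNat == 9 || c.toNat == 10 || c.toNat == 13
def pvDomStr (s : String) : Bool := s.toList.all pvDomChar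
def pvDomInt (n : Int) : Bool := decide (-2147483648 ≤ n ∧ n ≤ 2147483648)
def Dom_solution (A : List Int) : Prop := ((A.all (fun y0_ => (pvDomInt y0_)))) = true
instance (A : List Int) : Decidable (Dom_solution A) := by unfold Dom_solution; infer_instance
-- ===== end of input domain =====

-- B replaces A's per-guest counter scan with an index-jump loop (one step per room);
-- both A and B sort the argument in place in Python — the equivalence proved here is about the return value.

-- ===== PORT A =====
-- for i in range(1, len(A)): counter/branch scan, as structural recursion over the index i
def solLoopA (L : List Int) (i : Nat) (rooms cap g : Int) : Int :=
  if h : i < L.length then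
    if g < cap then solLoopA L (i + 1) rooms cap (g + 1)
    else solLoopA L (i + 1) (rooms + 1) L[i] 1
  else rooms
termination_by L.length - i

def solution (A : List Int) : Int :=
  let L := PySem.List.sorted A (fun x => x) false
  match PySem.List.pyGet? L 0 with
  | none => 0            -- unreached under Pre_solution: Python A raises IndexError on []
  | some c0 => solLoopA L 1 1 c0 1

-- ===== PORT B =====
-- while i < n: rooms += 1; i += max(1, A[i])   (i stays ≥ 0, so it is a Nat here)
def solAltLoop (L : List Int) (i : Nat) (rooms : Int) : Int :=
  if h : i < L.length then
    solAltLoop L (i + (max 1 L[i]).toNat) (rooms + 1)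
  else rooms
termination_by L.length - i
decreasing_by omega

def solution_alt (A : List Int) : Int :=
  let L := PySem.List.sorted A (fun x => x) false
  if L.length = 0 then 0
  else solAltLoop L 0 0

-- ===== PRECONDITION & SPEC =====
-- Pre_ excludes only the empty list, on which Python A raises IndexError reading the first element.
def Pre_solution (A : List Int) : Prop := A ≠ []
instance (A : List Int) : Decidable (Pre_solution A) := by unfold Pre_solution; infer_instance
def pvWitness_solution : List Int := ([3, 1, 2])

def Spec_solution (A : List Int) (out : Int) : Prop := out = solution_alt A
instance (A : List Int) (out : Int) : Decidable (Spec_solution A out) := by unfold Spec_solution; infer_instance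

-- ===== CLAIM (what is proved, stated in full; the proofs are below) =====
def Claim_equal_solution : Prop := ∀ (A : List Int), Dom_solution A → Pre_solution A → Spec_solution A (solution A)

-- ===== LEMMAS AND PROOFS =====

-- Key lemma (no sortedness needed): A's counter scan from index i with g guests already in a
-- room of capacity cap equals B's jump scan restarted at the index where the next room opens.
theorem solLoopA_eq_alt (L : List Int) :
    ∀ (m i : Nat) (rooms cap g : Int), L.length - i ≤ m → 1 ≤ g →
      solLoopA L i rooms cap g = solAltLoop L (i + (cap - g).toNat) rooms := by
  intro m
  induction m with
  | zero =>
    intro i rooms cap g hm _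
    rw [solLoopA, solAltLoop]
    rw [dif_neg (by omega), dif_neg (by omega)]
  | succ m ih =>
    intro i rooms cap g hm hg
    by_cases h : i < L.length
    · rw [solLoopA, dif_pos h]
      by_cases hlt : g < cap
      · rw [if_pos hlt, ih (i + 1) rooms cap (g + 1) (by omega) (by omega)]
        congr 1; omega
      · rw [if_neg hlt, ih (i + 1) (rooms + 1) L[i] 1 (by omega) le_rfl]
        have h0 : (cap - g).toNat = 0 := by omega
        rw [h0]
        conv_rhs => rw [solAltLoop, dif_pos (by omega : i + 0 < L.length)]
        congr 1
        have : (max 1 L[i + 0]).toNat = 1 + (L[i] - 1).toNat := by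
          simp only [Nat.add_zero]
          by_cases hc : L[i] ≤ 1
          · rw [max_eq_left hc]; omega
          · rw [max_eq_right (by omega)]; omega
        omega
    · rw [solLoopA, solAltLoop]
      rw [dif_neg h, dif_neg (by omega)]

-- ===== VERDICT (by name: the statement is the Claim_ definition above) =====
theorem solution_spec : Claim_equal_solution := by
  intro A _ hA
  unfold Spec_solution solution solution_alt
  have hL : PySem.List.sorted A (fun x => x) false ≠ [] := by
    simpa [PySem.List.sorted_eq_nil_iff] using hA
  set L := PySem.List.sorted A (fun x => x) false with hLdef
  obtain ⟨c0, t, hcons⟩ := List.exists_cons_of_ne_nil hL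
  rw [hcons]
  simp only [PySem.List.pyGet?_zero_cons]
  rw [solLoopA_eq_alt (c0 :: t) ((c0 :: t).length) 1 1 c0 1 (by omega) le_rfl]
  have hlen : (c0 :: t).length ≠ 0 := by simp
  rw [if_neg hlen]
  conv_rhs => rw [solAltLoop, dif_pos (by simp : 0 < (c0 :: t).length)]
  congr 1
  simp only [List.getElem_cons_zero]
  by_cases hc : c0 ≤ 1
  · rw [max_eq_left hc]; omega
  · rw [max_eq_right (by omega)]; omega
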